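-- pv_equiv track=rewrite | github.com/modestfool/CoursesAndInterviews | Interviews/src/AkunaCapital/pythonCode/CheapestTransform.py | find_cheapest_transform
-- ===== SOURCE A (Python) =====
-- def  find_cheapest_transform(input, output, cost_function):
--     if len(input) - len(output) != 0:
--         return -1
--     cost = 0
--     for i in range(len(input)):
--         if input[i] == output[i]:
--             continue
--         char_cost = minTransform(input[i], output[i], cost_function)
--         # print input_[i] + "->" +  output[i] + ": " + str(char_cost)
--         cost += char_cost
--     return cost
--
-- def minTransform(c,w,cost_function, depth = 3):
--     costs = []
--     if c == w:
--         return 0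
--     else:
--         cost_map = cost_function[ord(c) - ord('a')]
--         localcost = cost_map[ord(w) - ord('a')]
--         costs.append(localcost)
--         if depth <= 1:
--             return localcost
--         for i in range(len(cost_map)):
--             if cost_map[i] > localcost or (i == ord(c) - ord('a')):
--                 continue
--             else:
--                 via_cost = cost_map[i] + minTransform(chr(i + ord('a')), w, cost_function, depth -1)
--
--                 costs.append(via_cost)
--     return min(costs)
-- ===== SOURCE B (Python) =====
-- LETTERS = "abcdefghijklmnopqrstuvwxyz"
--
-- def _best(i, w, g, cost_function):
--     # depth-(d+1) cost of turning letter i into letter w, given the depth-d layer g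
--     if i == w:
--         return 0
--     row = cost_function[i]
--     direct = row[w]
--     best = direct
--     for j in range(26):
--         if j != i and row[j] <= direct:
--             best = min(best, row[j] + g[j])
--     return best
--
-- def _reach_costs(b, cost_function):
--     # bottom-up: depth-1 layer, then deepen twice to depth 3
--     w = LETTERS.index(b)
--     g = [0 if i == w else cost_function[i][w] for i in range(26)]
--     for _ in range(2):
--         g = [_best(i, w, g, cost_function) for i in range(26)]
--     return g
--
-- def find_cheapest_transform(input, output, cost_function):
--     if len(input) != len(output):
--         return -1
--     total = 0
--     tables = {}
--     for a, b in zip(input, output):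
--         if a == b:
--             continue
--         if b not in tables:
--             tables[b] = _reach_costs(b, cost_function)
--         total += tables[b][LETTERS.index(a)]
--     return total
-- ===== Notes on version B (the rewrite author's own statement) =====
-- stated objective: alternative
-- what changed: Replaced the depth-3 recursive descent per differing character by a bottom-up layered DP that builds the 26-entry reach-cost table for a target letter once and caches it per target letter, so repeated pairs read a table instead of re-descending the recursion.
-- outside the precondition, e.g. on find_cheapest_transform('a', 'b', [[0, 5], [1, 0]]): A returns 5, B raises IndexError; on find_cheapest_transform('`', 'a', [[0, 1], [1, 0]]): A returns 1, B raises IndexError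
import Mathlib
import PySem

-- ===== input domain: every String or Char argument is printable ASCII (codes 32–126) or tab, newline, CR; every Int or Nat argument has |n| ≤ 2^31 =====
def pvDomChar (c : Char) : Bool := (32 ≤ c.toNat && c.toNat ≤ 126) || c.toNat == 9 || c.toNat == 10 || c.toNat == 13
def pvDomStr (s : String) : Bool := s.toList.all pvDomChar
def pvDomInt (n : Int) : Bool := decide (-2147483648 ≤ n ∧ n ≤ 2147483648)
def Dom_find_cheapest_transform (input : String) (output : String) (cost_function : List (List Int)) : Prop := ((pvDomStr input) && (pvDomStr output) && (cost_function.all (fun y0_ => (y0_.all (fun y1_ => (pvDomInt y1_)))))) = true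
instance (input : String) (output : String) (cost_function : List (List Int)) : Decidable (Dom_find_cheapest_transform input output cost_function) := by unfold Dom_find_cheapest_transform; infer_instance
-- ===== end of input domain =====

-- B replaces A's per-position depth-3 recursion by a bottom-up layered table built (and cached) once
-- per target letter; a genuinely different algorithm of similar size (neither program mutates its arguments).

-- ===== PORT A =====
-- literal port of minTransform (depth is Python's depth parameter; the dependent if only supplies termination)
def minTransformA (cost_function : List (List Int)) (w : Char) (depth : Nat) (c : Char) : Int :=
  if c == w then 0
  else
    let cost_map := (PySem.List.pyGet? cost_function ((c.toNat : Int) - 97)).getD []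
    let localcost := (PySem.List.pyGet? cost_map ((w.toNat : Int) - 97)).getD 0
    if _h : depth ≤ 1 then localcost
    else
      let costs := (List.range cost_map.length).foldl (fun acc (i : Nat) =>
        if ((PySem.List.pyGet? cost_map (i : Int)).getD 0 > localcost) || ((i : Int) == (c.toNat : Int) - 97) then acc
        else acc ++ [(PySem.List.pyGet? cost_map (i : Int)).getD 0
                      + minTransformA cost_function w (depth - 1) (Char.ofNat (i + 97))])
        [localcost]
      (PySem.List.min? costs (fun x => x)).getD 0
termination_by depth
decreasing_by omega

def find_cheapest_transform (input : String) (output : String) (cost_function : List (List Int)) : Int :=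
  if ((input.toList.length : Int) - (output.toList.length : Int)) ≠ 0 then -1
  else
    (List.range input.toList.length).foldl (fun cost (i : Nat) =>
      let ci := (PySem.Str.pyGet? input (i : Int)).getD ' '
      let wi := (PySem.Str.pyGet? output (i : Int)).getD ' '
      if ci == wi then cost
      else cost + minTransformA cost_function wi 3 ci) 0

-- ===== PORT B =====
def pvLetters : List Char := "abcdefghijklmnopqrstuvwxyz".toList

def pvBest (i w : Nat) (g : List Int) (cost_function : List (List Int)) : Int :=
  if i == w then 0
  else
    let row := (PySem.List.pyGet? cost_function (i : Int)).getD []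
    let direct := (PySem.List.pyGet? row (w : Int)).getD 0
    (List.range 26).foldl (fun best j =>
      if j ≠ i ∧ (PySem.List.pyGet? row (j : Int)).getD 0 ≤ direct then
        min best ((PySem.List.pyGet? row (j : Int)).getD 0 + (PySem.List.pyGet? g (j : Int)).getD 0)
      else best) direct

def pvReachCosts (b : Char) (cost_function : List (List Int)) : List Int :=
  let w := (PySem.List.index? pvLetters b).getD 0
  let g0 := (List.range 26).map (fun i =>
    if i == w then 0
    else (PySem.List.pyGet? ((PySem.List.pyGet? cost_function (i : Int)).getD []) (w : Int)).getD 0)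
  (List.range 2).foldl (fun g _ => (List.range 26).map (fun i => pvBest i w g cost_function)) g0

def find_cheapest_transform_alt (input : String) (output : String) (cost_function : List (List Int)) : Int :=
  if input.toList.length ≠ output.toList.length then -1
  else
    ((input.toList.zip output.toList).foldl
      (fun (st : Int × PySem.Dict Char (List Int)) ab =>
        if ab.1 == ab.2 then st
        else
          let tables := if st.2.contains ab.2 then st.2
                        else st.2.insert ab.2 (pvReachCosts ab.2 cost_function)
          (st.1 + (PySem.List.pyGet? (tables.getD ab.2 [])
                     (((PySem.List.index? pvLetters ab.1).getD 0 : Nat) : Int)).getD 0, tables))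
      (0, PySem.Dict.empty)).1

-- ===== PRECONDITION & SPEC =====
-- Pre_ excludes inputs on which A returns only by accident of Python indexing: equal-length inputs with a
-- differing position whose characters are not lowercase letters (negative ord wraps around), or whose cost
-- matrix is not a full 26×26 table (A happens to stay in range); B's letter lookup/table raises there.
def Pre_find_cheapest_transform (input : String) (output : String) (cost_function : List (List Int)) : Prop :=
  input.toList.length = output.toList.length →
    ((∀ p ∈ input.toList.zip output.toList, p.1 ≠ p.2 →
        (97 ≤ p.1.toNat ∧ p.1.toNat ≤ 122 ∧ 97 ≤ p.2.toNat ∧ p.2.toNat ≤ 122)) ∧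
     (input ≠ output → (cost_function.length = 26 ∧ ∀ r ∈ cost_function, r.length = 26)))
instance (input : String) (output : String) (cost_function : List (List Int)) : Decidable (Pre_find_cheapest_transform input output cost_function) := by unfold Pre_find_cheapest_transform; infer_instance

def pvWitness_find_cheapest_transform : String × String × List (List Int) := ("ab", "ab", [])

def Spec_find_cheapest_transform (input : String) (output : String) (cost_function : List (List Int)) (out : Int) : Prop := out = find_cheapest_transform_alt input output cost_function
instance (input : String) (output : String) (cost_function : List (List Int)) (out : Int) : Decidable (Spec_find_cheapest_transform input output cost_function out) := by unfold Spec_find_cheapest_transform; infer_instance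

-- ===== CLAIM (what is proved, stated in full; the proofs are below) =====
def Claim_equal_find_cheapest_transform : Prop := ∀ (input : String) (output : String) (cost_function : List (List Int)), Dom_find_cheapest_transform input output cost_function → Pre_find_cheapest_transform input output cost_function → Spec_find_cheapest_transform input output cost_function (find_cheapest_transform input output cost_function)

-- ===== LEMMAS AND PROOFS =====

def pvShape (cf : List (List Int)) : Prop := cf.length = 26 ∧ ∀ r ∈ cf, r.length = 26

def pvLower (c : Char) : Prop := 97 ≤ c.toNat ∧ c.toNat ≤ 122

-- the depth-d layer of A's recursion, as a 26-entry table
def pvGTable (cf : List (List Int)) (w : Char) (d : Nat) : List Int :=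
  (List.range 26).map (fun i => minTransformA cf w d (Char.ofNat (i + 97)))

theorem pvChar_toNat {i : Nat} (h : i < 26) : (Char.ofNat (i + 97)).toNat = i + 97 := by
  interval_cases i <;> decide

theorem pvLower_char {c : Char} (hc : pvLower c) :
    ∃ i, i < 26 ∧ c = Char.ofNat (i + 97) := by
  obtain ⟨hc1, hc2⟩ := hc
  refine ⟨c.toNat - 97, by omega, ?_⟩
  have h1 : c.toNat - 97 + 97 = c.toNat := by omega
  rw [h1, Char.ofNat_toNat]

theorem pvChar_eq_iff {i : Nat} (h : i < 26) {w : Char} (hw : pvLower w) :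
    (Char.ofNat (i + 97) = w) ↔ i = w.toNat - 97 := by
  obtain ⟨hw1, hw2⟩ := hw
  constructor
  · intro he
    have := congrArg Char.toNat he
    rw [pvChar_toNat h] at this
    omega
  · intro he
    have h1 : i + 97 = w.toNat := by omega
    rw [h1, Char.ofNat_toNat]

theorem pvIndex_letters {c : Char} (hc : pvLower c) :
    PySem.List.index? pvLetters c = some (c.toNat - 97) := by
  obtain ⟨i, hi, rfl⟩ := pvLower_char hc
  rw [pvChar_toNat hi]
  have h1 : i + 97 - 97 = i := by omega
  rw [h1]
  interval_cases i <;> decide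

theorem pvGTable_get {cf : List (List Int)} {w : Char} {d : Nat} {j : Nat} (hj : j < 26) :
    (PySem.List.pyGet? (pvGTable cf w d) (j : Int)).getD 0
      = minTransformA cf w d (Char.ofNat (j + 97)) := by
  simp [pvGTable, hj]

-- min over an appended-candidates list = the running-min loop
theorem pvMinFold (P : Nat → Bool) (v : Nat → Int) :
    ∀ (l : List Nat) (a : Int) (t : List Int),
      (PySem.List.min? (l.foldl (fun acc j => if P j then acc else acc ++ [v j]) (a :: t)) (fun x => x)).getD 0
        = l.foldl (fun best j => if P j then best else min best (v j)) (t.foldl min a) := by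
  intro l
  induction l with
  | nil => intro a t; simp [PySem.List.min?_id_cons]
  | cons j l ih =>
    intro a t
    simp only [List.foldl_cons]
    by_cases hp : P j
    · simp only [hp, if_true]
      exact ih a t
    · simp only [hp, Bool.false_eq_true, if_false]
      have h1 : (a :: t) ++ [v j] = a :: (t ++ [v j]) := rfl
      rw [h1, ih, List.foldl_append]
      simp

theorem pvBest_eq {cf : List (List Int)} {w : Char} (hw : pvLower w) (hs : pvShape cf)
    {d : Nat} (hd : 1 ≤ d) {g : List Int}
    (hg : ∀ j : Nat, j < 26 → (PySem.List.pyGet? g (j : Int)).getD 0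
            = minTransformA cf w d (Char.ofNat (j + 97)))
    {i : Nat} (hi : i < 26) :
    pvBest i (w.toNat - 97) g cf = minTransformA cf w (d + 1) (Char.ofNat (i + 97)) := by
  rw [minTransformA, pvBest]
  by_cases hew : Char.ofNat (i + 97) = w
  · have hiw : i = w.toNat - 97 := (pvChar_eq_iff hi hw).mp hew
    subst hiw
    simp only [hew, beq_self_eq_true, if_true]
  · have hiw : ¬ (i = w.toNat - 97) := fun h => hew ((pvChar_eq_iff hi hw).mpr h)
    have hbe : ((Char.ofNat (i + 97) == w) = false) := by
      simp [hew]
    simp only [hbe, Bool.false_eq_true, if_false, beq_iff_eq, hiw]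
    have hcl : cf.length = 26 := hs.1
    rw [pvChar_toNat hi]
    have hidx : ((i + 97 : Nat) : Int) - 97 = (i : Int) := by push_cast; ring
    rw [hidx]
    have hrow : PySem.List.pyGet? cf (i : Int) = some (cf[i]'(by omega)) := by
      rw [PySem.List.pyGet?_natCast]
      exact List.getElem?_eq_getElem (by omega)
    rw [hrow]
    have hrl : (cf[i]'(by omega : i < cf.length)).length = 26 := hs.2 _ (List.getElem_mem _)
    have hwn : ((w.toNat : Int) - 97) = ((w.toNat - 97 : Nat) : Int) := by
      have := hw.1; omega
    rw [hwn]
    simp only [Option.getD_some, hrl]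
    have hd1 : ¬ (d + 1 ≤ 1) := by omega
    simp only [hd1, dite_false]
    rw [pvMinFold]
    simp only [List.foldl_nil]
    apply PySem.List.foldl_congr_mem
    intro best j hjmem
    have hj : j < 26 := by simpa [List.mem_range] using hjmem
    rw [hg j hj]
    simp only [PySem.List.pyGet?_natCast, gt_iff_lt, Nat.cast_inj, beq_iff_eq, ne_eq,
      decide_eq_true_eq, Bool.or_eq_true]
    split_ifs with h1 h2 <;> first | rfl | (exfalso; omega)

theorem pvReach_eq {cf : List (List Int)} {b : Char} (hb : pvLower b) (hs : pvShape cf) :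
    pvReachCosts b cf = pvGTable cf b 3 := by
  rw [pvReachCosts, pvIndex_letters hb]
  simp only [Option.getD_some]
  have hg0 : (List.range 26).map (fun i =>
      if i == b.toNat - 97 then (0 : Int)
      else (PySem.List.pyGet? ((PySem.List.pyGet? cf (i : Int)).getD []) ((b.toNat - 97 : Nat) : Int)).getD 0)
      = pvGTable cf b 1 := by
    rw [pvGTable]
    apply List.map_congr_left
    intro i hmem
    have hi : i < 26 := by simpa [List.mem_range] using hmem
    rw [minTransformA]
    by_cases hew : Char.ofNat (i + 97) = b
    · have hiw : i = b.toNat - 97 := (pvChar_eq_iff hi hb).mp hew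
      subst hiw
      simp only [hew, beq_self_eq_true, if_true]
    · have hiw : ¬ (i = b.toNat - 97) := fun h => hew ((pvChar_eq_iff hi hb).mpr h)
      have hbe : ((Char.ofNat (i + 97) == b) = false) := by simp [hew]
      simp only [hbe, Bool.false_eq_true, if_false, beq_iff_eq, hiw]
      rw [pvChar_toNat hi]
      have hidx : ((i + 97 : Nat) : Int) - 97 = (i : Int) := by push_cast; ring
      have hwn : ((b.toNat : Int) - 97) = ((b.toNat - 97 : Nat) : Int) := by
        have := hb.1; omega
      rw [hidx, hwn]
      simp [hiw]
  rw [hg0]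
  have hstep : ∀ d : Nat, 1 ≤ d →
      (List.range 26).map (fun i => pvBest i (b.toNat - 97) (pvGTable cf b d) cf)
        = pvGTable cf b (d + 1) := by
    intro d hd
    simp only [pvGTable]
    apply List.map_congr_left
    intro i hmem
    have hi : i < 26 := by simpa [List.mem_range] using hmem
    exact pvBest_eq hb hs hd (fun j hj => pvGTable_get hj) hi
  show (List.range 2).foldl _ _ = _
  have h2 : List.range 2 = [0, 1] := by decide
  rw [h2]
  simp only [List.foldl_cons, List.foldl_nil]
  rw [hstep 1 (by omega), hstep 2 (by omega)]

theorem pvPair {cf : List (List Int)} {a b : Char} (ha : pvLower a) (hb : pvLower b)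
    (hs : pvShape cf) :
    (PySem.List.pyGet? (pvReachCosts b cf)
        (((PySem.List.index? pvLetters a).getD 0 : Nat) : Int)).getD 0
      = minTransformA cf b 3 a := by
  obtain ⟨ha1, ha2⟩ := id ha
  rw [pvIndex_letters ha, pvReach_eq hb hs]
  simp only [Option.getD_some]
  rw [pvGTable_get (by omega : a.toNat - 97 < 26)]
  have h1 : a.toNat - 97 + 97 = a.toNat := by omega
  rw [h1, Char.ofNat_toNat]

-- A's index loop over two equal-length strings = the fold over their zip
theorem pvRangeZip (f : Int → Char → Char → Int) :
    ∀ (xs ys : List Char), xs.length = ys.length → ∀ c0 : Int,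
      (List.range xs.length).foldl
          (fun c i => f c ((xs[i]?).getD ' ') ((ys[i]?).getD ' ')) c0
        = (xs.zip ys).foldl (fun c p => f c p.1 p.2) c0 := by
  intro xs
  induction xs with
  | nil => intro ys h c0; simp
  | cons x xs ih =>
    intro ys h c0
    cases ys with
    | nil => simp at h
    | cons y ys =>
      simp only [List.length_cons, List.zip_cons_cons, List.foldl_cons]
      rw [List.range_succ_eq_map]
      simp only [List.foldl_cons, List.foldl_map, List.getElem?_cons_zero, Option.getD_some]
      have h' : xs.length = ys.length := by simpa using h
      simpa using ih ys h' (f c0 x y)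

theorem pvZip_self (l : List Char) : l.zip l = l.map (fun x => (x, x)) := by
  induction l with
  | nil => rfl
  | cons x l ih => simp [ih]

def pvInv (cf : List (List Int)) (tables : PySem.Dict Char (List Int)) : Prop :=
  ∀ k v, tables.get? k = some v → v = pvReachCosts k cf

theorem pvBLoop (cf : List (List Int)) :
    ∀ (zl : List (Char × Char)) (total : Int) (tables : PySem.Dict Char (List Int)),
      pvInv cf tables →
      (∀ p ∈ zl, p.1 ≠ p.2 → pvLower p.1 ∧ pvLower p.2 ∧ pvShape cf) →
      ((zl.foldl
          (fun (st : Int × PySem.Dict Char (List Int)) ab =>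
            if ab.1 == ab.2 then st
            else
              let tables := if st.2.contains ab.2 then st.2
                            else st.2.insert ab.2 (pvReachCosts ab.2 cf)
              (st.1 + (PySem.List.pyGet? (tables.getD ab.2 [])
                         (((PySem.List.index? pvLetters ab.1).getD 0 : Nat) : Int)).getD 0, tables))
          (total, tables)).1)
        = zl.foldl (fun c p => if p.1 == p.2 then c else c + minTransformA cf p.2 3 p.1) total := by
  intro zl
  induction zl with
  | nil => intro total tables _ _; rfl
  | cons p zl ih =>
    intro total tables hinv H
    obtain ⟨a, b⟩ := p
    by_cases hab : a = b
    · simp only [List.foldl_cons, hab, beq_self_eq_true, if_true]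
      exact ih total tables hinv (fun q hq => H q (List.mem_cons_of_mem _ hq))
    · have hbe : ((a == b) = false) := by simp [hab]
      obtain ⟨hla, hlb, hs⟩ := H (a, b) List.mem_cons_self hab
      simp only [List.foldl_cons, hbe, Bool.false_eq_true, if_false]
      set tables' := if tables.contains b then tables
                     else tables.insert b (pvReachCosts b cf) with htdef
      have hinv' : pvInv cf tables' := by
        rw [htdef]
        by_cases hc : tables.contains b
        · simpa [hc] using hinv
        · simp only [hc, Bool.false_eq_true, if_false]
          intro k v hkv
          rw [PySem.Dict.get?_insert] at hkv
          by_cases hk : k = b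
          · simp only [hk, if_true] at hkv
            rw [hk]; exact (Option.some_inj.mp hkv).symm
          · simp only [hk, if_false] at hkv
            exact hinv k v hkv
      have hval : tables'.getD b [] = pvReachCosts b cf := by
        rw [htdef]
        by_cases hc : tables.contains b
        · simp only [hc, if_true]
          have : (tables.get? b).isSome := by
            rw [← PySem.Dict.contains_eq_isSome_get?]; exact hc
          obtain ⟨v, hv⟩ := Option.isSome_iff_exists.mp this
          rw [PySem.Dict.getD_eq_get?_getD, hv]
          simp only [Option.getD_some]
          exact hinv b v hv
        · simp only [hc, Bool.false_eq_true, if_false]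
          rw [PySem.Dict.getD_eq_get?_getD, PySem.Dict.get?_insert_self]
          simp only [Option.getD_some]
      rw [ih _ tables' hinv' (fun q hq => H q (List.mem_cons_of_mem _ hq))]
      rw [hval, pvPair hla hlb hs]

-- ===== VERDICT (by name: the statement is the Claim_ definition above) =====
theorem find_cheapest_transform_spec : Claim_equal_find_cheapest_transform := by
  intro input output cf _ hpre
  unfold Spec_find_cheapest_transform
  rw [find_cheapest_transform, find_cheapest_transform_alt]
  by_cases hlen : input.toList.length = output.toList.length
  · have hc0 : ¬ (((input.toList.length : Int) - (output.toList.length : Int)) ≠ 0) := by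
      rw [hlen]; simp
    rw [if_neg hc0, if_neg (fun h => h hlen)]
    have H : ∀ p ∈ input.toList.zip output.toList, p.1 ≠ p.2 →
        pvLower p.1 ∧ pvLower p.2 ∧ pvShape cf := by
      intro p hp hne
      obtain ⟨h1, h2, h3, h4⟩ := (hpre hlen).1 p hp hne
      refine ⟨⟨h1, h2⟩, ⟨h3, h4⟩, ?_⟩
      have hio : input ≠ output := by
        intro he
        rw [he, pvZip_self] at hp
        obtain ⟨x, _, hx⟩ := List.mem_map.mp hp
        exact hne (by rw [← hx])
      exact (hpre hlen).2 hio
    rw [pvBLoop cf (input.toList.zip output.toList) 0 PySem.Dict.empty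
        (by intro k v hkv; simp [PySem.Dict.get?_empty] at hkv) H]
    refine Eq.trans (PySem.List.foldl_congr_mem (List.range input.toList.length) _
        (fun (cost : Int) (i : Nat) =>
          if ((input.toList[i]?).getD ' ') == ((output.toList[i]?).getD ' ') then cost
          else cost + minTransformA cf ((output.toList[i]?).getD ' ') 3
            ((input.toList[i]?).getD ' ')) 0 ?_) ?_
    · intro acc x _
      simp only [PySem.Str.pyGet?_natCast]
    · exact pvRangeZip (fun c a b => if a == b then c else c + minTransformA cf b 3 a)
        input.toList output.toList hlen 0
  · have hc1 : (((input.toList.length : Int) - (output.toList.length : Int)) ≠ 0) := by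
      intro h; apply hlen; omega
    rw [if_pos hc1, if_pos hlen]
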